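-- pv_equiv track=rewrite | github.com/TimeIsOut/workplace | Solutions/6kyu/RoboScript #1 - Implement Syntax Highlighting.py | highlight
-- ===== SOURCE A (Python) =====
-- def highlight(code):
--     data = []
--     answer, previous_char = "", ""
--     for i in code:
--         if previous_char == i or previous_char.isdigit() == i.isdigit() == 1:
--             data[-1] += i
--         else:
--             data.append(i)
--         previous_char = i
--     for i in range(len(data)):
--         if data[i][0] == "F":
--             data[i] = f'<span style="color: pink">{data[i]}</span>'
--         elif data[i][0] == "L":
--             data[i] = f'<span style="color: red">{data[i]}</span>'
--         elif data[i][0] == "R":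
--             data[i] = f'<span style="color: green">{data[i]}</span>'
--         elif data[i][0].isdigit():
--             data[i] = f'<span style="color: orange">{data[i]}</span>'
--     return ''.join(data)
-- ===== SOURCE B (Python) =====
-- def highlight(code):
--     COLORS = {'F': 'pink', 'L': 'red', 'R': 'green'}
--     out = []
--     n = len(code)
--     i = 0
--     while i < n:
--         j = i + 1
--         if code[i].isdigit():
--             while j < n and code[j].isdigit():
--                 j += 1
--         else:
--             while j < n and code[j] == code[i]:
--                 j += 1
--         tok = code[i:j]
--         color = 'orange' if code[i].isdigit() else COLORS.get(code[i])
--         out.append(f'<span style="color: {color}">{tok}</span>' if color else tok)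
--         i = j
--     return ''.join(out)
-- ===== Notes on version B (the rewrite author's own statement) =====
-- stated objective: alternative
-- what changed: A builds a token list with a previous_char accumulator and then rewrites each token in place in a second pass; B is a single two-pointer scan that cuts each maximal run (digit run or equal-char run) directly and wraps it immediately via a color dict keyed on the run's first character.
import Mathlib
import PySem

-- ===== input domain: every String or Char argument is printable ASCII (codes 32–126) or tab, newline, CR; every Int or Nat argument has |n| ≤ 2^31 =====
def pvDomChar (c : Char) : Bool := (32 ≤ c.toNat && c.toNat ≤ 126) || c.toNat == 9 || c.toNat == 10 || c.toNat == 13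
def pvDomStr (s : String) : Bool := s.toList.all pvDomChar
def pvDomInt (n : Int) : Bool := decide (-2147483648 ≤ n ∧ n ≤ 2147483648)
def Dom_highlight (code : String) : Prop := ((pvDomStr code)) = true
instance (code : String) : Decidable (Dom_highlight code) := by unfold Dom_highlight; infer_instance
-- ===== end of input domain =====

-- B is a single streaming two-pointer scan that wraps each run as it is cut, instead of A's
-- build-token-list-then-rewrite-in-place two passes (objective: alternative decomposition).

-- ===== PORT A =====
-- one iteration of A's first loop; state = (data, previous_char); previous_char kept as List Char ("" = [])
def pvStepA (st : List (List Char) × List Char) (c : Char) : List (List Char) × List Char :=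
  if st.2 == [c] || (PySem.Chars.strIsdigit st.2 && PySem.Chars.isdigit c) then
    -- data[-1] += i  (data is nonempty whenever this branch is reached in Python)
    (st.1.dropLast ++ [(st.1.getLast?.getD []) ++ [c]], [c])
  else
    (st.1 ++ [[c]], [c])

-- A's second loop body: rewrite one token by its first character
def pvWrapA (t : List Char) : List Char :=
  match t.head? with
  | none => t  -- unreachable: every token produced by the first loop is nonempty
  | some h =>
    if h == 'F' then "<span style=\"color: pink\">".toList ++ t ++ "</span>".toList
    else if h == 'L' then "<span style=\"color: red\">".toList ++ t ++ "</span>".toList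
    else if h == 'R' then "<span style=\"color: green\">".toList ++ t ++ "</span>".toList
    else if PySem.Chars.isdigit h then "<span style=\"color: orange\">".toList ++ t ++ "</span>".toList
    else t

def highlight (code : String) : String :=
  String.mk ((((code.toList.foldl pvStepA ([], [])).1).map pvWrapA).flatten)

-- ===== PORT B =====
def pvColors : PySem.Dict Char (List Char) :=
  PySem.Dict.ofList [('F', "pink".toList), ('L', "red".toList), ('R', "green".toList)]

-- 'color = ...; out.append(f'<span ...>{tok}</span>' if color else tok)'
def pvWrapB (h : Char) (tok : List Char) : List Char :=
  match (if PySem.Chars.isdigit h then some "orange".toList else PySem.Dict.get? pvColors h) with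
  | some color => "<span style=\"color: ".toList ++ color ++ "\">".toList ++ tok ++ "</span>".toList
  | none => tok

-- the while loop over indices i, j, transliterated as recursion on the remaining characters
def pvGoB : List Char → List (List Char)
  | [] => []
  | c :: rest =>
    let p := if PySem.Chars.isdigit c then PySem.Chars.isdigit else (fun x => x == c)
    pvWrapB c (c :: rest.takeWhile p) :: pvGoB (rest.dropWhile p)
  termination_by cs => cs.length
  decreasing_by
    simp only [List.length_cons]
    exact Nat.lt_succ_of_le (List.length_dropWhile_le _ _)

def highlight_alt (code : String) : String :=
  String.mk (pvGoB code.toList).flatten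

-- ===== PRECONDITION & SPEC =====
def Spec_highlight (code : String) (out : String) : Prop := out = highlight_alt code
instance (code : String) (out : String) : Decidable (Spec_highlight code out) := by unfold Spec_highlight; infer_instance

-- ===== CLAIM (what is proved, stated in full; the proofs are below) =====
def Claim_equal_highlight : Prop := ∀ (code : String), Dom_highlight code → Spec_highlight code (highlight code)

-- ===== LEMMAS AND PROOFS =====

-- predicate B uses to extend a run whose first character is h
def pvPB (h : Char) : Char → Bool :=
  if PySem.Chars.isdigit h then PySem.Chars.isdigit else (fun x => x == h)

-- A's extension condition, with previous_char = [p]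
def pvCondA (p c : Char) : Bool := p == c || (PySem.Chars.isdigit p && PySem.Chars.isdigit c)

-- the token list A's first loop produces, with open run t whose last char is p
def pvTokA (t : List Char) (p : Char) : List Char → List (List Char)
  | [] => [t]
  | c :: rest => if pvCondA p c then pvTokA (t ++ [c]) c rest else t :: pvTokA [c] c rest

-- every run is all-digits or all-copies of one non-digit character
def pvCoh (t : List Char) : Prop :=
  (∀ x ∈ t, PySem.Chars.isdigit x = true) ∨
  (∃ a, PySem.Chars.isdigit a = false ∧ ∀ x ∈ t, x = a)

theorem pvCoh_singleton (c : Char) : pvCoh [c] := by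
  by_cases hcd : PySem.Chars.isdigit c = true
  · left
    intro x hx
    have hx : x = c := by simpa using hx
    subst hx; exact hcd
  · right
    refine ⟨c, by simpa using hcd, ?_⟩
    intro x hx
    simpa using hx

theorem pvGoB_nil : pvGoB [] = [] := by
  rw [pvGoB.eq_def]

theorem pvGoB_cons (c : Char) (rest : List Char) :
    pvGoB (c :: rest) =
      pvWrapB c (c :: rest.takeWhile (pvPB c)) :: pvGoB (rest.dropWhile (pvPB c)) := by
  rw [pvGoB.eq_def]
  simp only [pvPB]

theorem pvStrIsdigit_singleton (p : Char) :
    PySem.Chars.strIsdigit [p] = PySem.Chars.isdigit p := by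
  simp [PySem.Chars.strIsdigit]

theorem pvStepA_singleton (data : List (List Char)) (p c : Char) :
    pvStepA (data, [p]) c =
      if pvCondA p c then (data.dropLast ++ [(data.getLast?.getD []) ++ [c]], [c])
      else (data ++ [[c]], [c]) := by
  have hb : (([p] : List Char) == [c]) = (p == c) := by
    simp [List.cons_beq_cons]
  simp only [pvStepA, pvCondA, pvStrIsdigit_singleton, hb]
  rfl

theorem pvL1 (cs : List Char) : ∀ (data : List (List Char)) (t : List Char) (p : Char),
    (cs.foldl pvStepA (data ++ [t], [p])).1 = data ++ pvTokA t p cs := by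
  induction cs with
  | nil => intro data t p; simp [pvTokA]
  | cons c rest ih =>
    intro data t p
    rw [List.foldl_cons, pvStepA_singleton]
    by_cases h : pvCondA p c = true
    · rw [if_pos h]
      simp only [List.dropLast_concat, List.getLast?_concat, Option.getD_some]
      rw [ih data (t ++ [c]) c]
      simp [pvTokA, h]
    · rw [if_neg (by simpa using h)]
      rw [ih (data ++ [t]) [c] c]
      simp [pvTokA, h]

set_option maxRecDepth 4000 in
theorem pvColors_get (h : Char) : PySem.Dict.get? pvColors h =
    if h == 'F' then some "pink".toList
    else if h == 'L' then some "red".toList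
    else if h == 'R' then some "green".toList
    else none := by
  have hc : pvColors =
      PySem.Dict.mk [('F', "pink".toList), ('L', "red".toList), ('R', "green".toList)] := by decide
  rw [hc]
  by_cases h1 : h = 'F'
  · subst h1; decide
  · by_cases h2 : h = 'L'
    · subst h2; decide
    · by_cases h3 : h = 'R'
      · subst h3; decide
      · have n1 : ('F' == h) = false := beq_eq_false_iff_ne.mpr (Ne.symm h1)
        have n2 : ('L' == h) = false := beq_eq_false_iff_ne.mpr (Ne.symm h2)
        have n3 : ('R' == h) = false := beq_eq_false_iff_ne.mpr (Ne.symm h3)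
        simp [PySem.Dict.get?, List.find?, n1, n2, n3, h1, h2, h3]

theorem pvWrap_eq (h : Char) (t : List Char) (ht : t.head? = some h) :
    pvWrapA t = pvWrapB h t := by
  rw [pvWrapA.eq_def, pvWrapB.eq_def, ht]
  rw [pvColors_get]
  have hpink : "<span style=\"color: pink\">".toList =
      "<span style=\"color: ".toList ++ "pink".toList ++ "\">".toList := by decide
  have hred : "<span style=\"color: red\">".toList =
      "<span style=\"color: ".toList ++ "red".toList ++ "\">".toList := by decide
  have hgreen : "<span style=\"color: green\">".toList =
      "<span style=\"color: ".toList ++ "green".toList ++ "\">".toList := by decide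
  have horange : "<span style=\"color: orange\">".toList =
      "<span style=\"color: ".toList ++ "orange".toList ++ "\">".toList := by decide
  by_cases hF : h = 'F'
  · subst hF
    have hdF : PySem.Chars.isdigit 'F' = false := by decide
    simp [hdF, hpink]
  · by_cases hL : h = 'L'
    · subst hL
      have hdL : PySem.Chars.isdigit 'L' = false := by decide
      simp [hdL, hred]
    · by_cases hR : h = 'R'
      · subst hR
        have hdR : PySem.Chars.isdigit 'R' = false := by decide
        simp [hdR, hgreen]
      · by_cases hd : PySem.Chars.isdigit h = true
        · simp [hF, hL, hR, hd, horange]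
        · simp [hF, hL, hR, hd]

theorem pvMemLast {t : List Char} {p : Char} (hl : t.getLast? = some p) : p ∈ t := by
  rcases List.getLast?_eq_some_iff.mp hl with ⟨ys, rfl⟩
  simp

theorem pvCond_eq (t : List Char) (h p c : Char) (hh : t.head? = some h)
    (hl : t.getLast? = some p) (hc : pvCoh t) : pvCondA p c = pvPB h c := by
  have hhm : h ∈ t := List.mem_of_mem_head? hh
  have hpm : p ∈ t := pvMemLast hl
  rcases hc with hd | ⟨a, ha, hall⟩
  · have hph := hd p hpm
    have hhh := hd h hhm
    simp [pvCondA, pvPB, hph, hhh]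
    by_cases hcd : PySem.Chars.isdigit c = true
    · simp [hcd]
    · simp [hcd]
      intro he; subst he; exact absurd hph (by simpa using hcd)
  · have hph := hall p hpm
    have hhh := hall h hhm
    subst hph hhh
    simp [pvCondA, pvPB, ha, eq_comm]

theorem pvM (cs : List Char) : ∀ (t : List Char) (h p : Char),
    t.head? = some h → t.getLast? = some p → pvCoh t →
    ((pvTokA t p cs).map pvWrapA).flatten =
      (pvWrapB h (t ++ cs.takeWhile (pvPB h)) :: pvGoB (cs.dropWhile (pvPB h))).flatten := by
  induction cs with
  | nil =>
    intro t h p hh hl hc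
    simp [pvTokA, pvGoB_nil, pvWrap_eq h t hh]
  | cons c rest ih =>
    intro t h p hh hl hc
    have htne : t ≠ [] := by intro he; simp [he] at hh
    have hcnd := pvCond_eq t h p c hh hl hc
    by_cases hb : pvPB h c = true
    · have hcoh' : pvCoh (t ++ [c]) := by
        rcases hc with hd | ⟨a, ha, hall⟩
        · left; intro x hx
          rcases List.mem_append.1 hx with hx | hx
          · exact hd x hx
          · have hx : x = c := by simpa using hx
            subst hx
            have hhd := hd h (List.mem_of_mem_head? hh)
            simpa [pvPB, hhd] using hb
        · right; refine ⟨a, ha, ?_⟩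
          intro x hx
          rcases List.mem_append.1 hx with hx | hx
          · exact hall x hx
          · have hx : x = c := by simpa using hx
            subst hx
            have hha := hall h (List.mem_of_mem_head? hh)
            subst hha
            simpa [pvPB, ha] using hb
      have hh' : (t ++ [c]).head? = some h := by
        cases t with
        | nil => exact absurd rfl htne
        | cons y ys => simpa using hh
      have hIH := ih (t ++ [c]) h c hh' (by simp) hcoh'
      simp only [pvTokA, hcnd, hb, if_pos, List.takeWhile_cons, List.dropWhile_cons]
      rw [hIH]
      simp
    · have hbf : pvPB h c = false := by simpa using hb
      have hIH := ih [c] c c rfl rfl (pvCoh_singleton c)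
      simp only [pvTokA, hcnd, hbf, List.takeWhile_cons, List.dropWhile_cons,
        Bool.false_eq_true, ite_false, List.map_cons, List.flatten_cons]
      rw [hIH, pvGoB_cons, pvWrap_eq h t hh]
      simp

theorem highlight_eq (code : String) : highlight code = highlight_alt code := by
  unfold highlight highlight_alt
  cases hcs : code.toList with
  | nil => simp [pvGoB_nil]
  | cons c rest =>
    have hstep : pvStepA ([], []) c = ([[c]], [c]) := by
      simp [pvStepA, PySem.Chars.strIsdigit]
    have hM := pvM rest [c] c c rfl rfl (pvCoh_singleton c)
    have hL := pvL1 rest [] [c] c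
    simp only [List.nil_append] at hL
    rw [List.foldl_cons, hstep, hL, hM, pvGoB_cons]
    simp

-- ===== VERDICT (by name: the statement is the Claim_ definition above) =====
theorem highlight_spec : Claim_equal_highlight := by
  intro code _
  unfold Spec_highlight
  exact highlight_eq code
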